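-- pv_equiv track=rewrite | github.com/BarQode/Sponge | src/integrations/sumologic.py | _infer_level
-- ===== SOURCE A (Python) =====
-- def _infer_level(message: str) -> str:
--     """Infer log level from message content."""
--     msg_lower = message.lower()
--
--     if any(word in msg_lower for word in ['critical', 'fatal', 'emergency']):
--         return 'CRITICAL'
--     elif any(word in msg_lower for word in ['error', 'exception', 'failed']):
--         return 'ERROR'
--     elif any(word in msg_lower for word in ['warning', 'warn']):
--         return 'WARNING'
--     elif any(word in msg_lower for word in ['info', 'information']):
--         return 'INFO'
--     elif any(word in msg_lower for word in ['debug', 'trace']):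
--         return 'DEBUG'
--     else:
--         return 'INFO'
-- ===== SOURCE B (Python) =====
-- _KEYWORD_RANKS = {
--     'critical': 0, 'fatal': 0, 'emergency': 0,
--     'error': 1, 'exception': 1, 'failed': 1,
--     'warning': 2, 'warn': 2,
--     'info': 3, 'information': 3,
--     'debug': 4, 'trace': 4,
-- }
-- _LEVEL_NAMES = ('CRITICAL', 'ERROR', 'WARNING', 'INFO', 'DEBUG')
--
--
-- def _infer_level(message: str) -> str:
--     """Infer log level: most severe rank among all matched keywords, default INFO."""
--     msg = message.lower()
--     matched = [rank for word, rank in _KEYWORD_RANKS.items() if word in msg]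
--     if not matched:
--         return 'INFO'
--     return _LEVEL_NAMES[min(matched)]
-- ===== Notes on version B (the rewrite author's own statement) =====
-- stated objective: alternative
-- what changed: Instead of a short-circuiting priority if/elif chain, B assigns every keyword a severity rank, collects the ranks of ALL keywords found in the message, and returns the name of the minimum (most severe) rank, defaulting to INFO when none match.
import Mathlib
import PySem

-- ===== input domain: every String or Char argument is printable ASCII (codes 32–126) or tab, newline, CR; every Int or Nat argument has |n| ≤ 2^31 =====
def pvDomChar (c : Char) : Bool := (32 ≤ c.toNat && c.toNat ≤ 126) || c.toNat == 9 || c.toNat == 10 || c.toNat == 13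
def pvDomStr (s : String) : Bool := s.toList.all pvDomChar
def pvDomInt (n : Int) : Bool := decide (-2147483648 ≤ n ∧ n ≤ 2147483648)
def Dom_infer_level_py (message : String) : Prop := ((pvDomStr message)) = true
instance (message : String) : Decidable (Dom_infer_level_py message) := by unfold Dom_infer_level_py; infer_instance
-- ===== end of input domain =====

-- ===== PORT A =====
-- A: unrolled if/elif chain, first matching keyword group wins, default "INFO".
def infer_level_py (message : String) : String :=
  let msg_lower := PySem.Str.lower message
  if ["critical", "fatal", "emergency"].any (fun word => PySem.Str.isIn word msg_lower) then "CRITICAL"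
  else if ["error", "exception", "failed"].any (fun word => PySem.Str.isIn word msg_lower) then "ERROR"
  else if ["warning", "warn"].any (fun word => PySem.Str.isIn word msg_lower) then "WARNING"
  else if ["info", "information"].any (fun word => PySem.Str.isIn word msg_lower) then "INFO"
  else if ["debug", "trace"].any (fun word => PySem.Str.isIn word msg_lower) then "DEBUG"
  else "INFO"

-- ===== PORT B =====
-- B: every keyword carries a severity rank; collect the ranks of ALL keywords found
-- in the message and return the name of the minimum rank; default "INFO" if none match.
def pvKeywordRanks : List (String × Nat) :=
  [ ("critical", 0), ("fatal", 0), ("emergency", 0)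
  , ("error", 1), ("exception", 1), ("failed", 1)
  , ("warning", 2), ("warn", 2)
  , ("info", 3), ("information", 3)
  , ("debug", 4), ("trace", 4) ]

def pvLevelNames : List String := ["CRITICAL", "ERROR", "WARNING", "INFO", "DEBUG"]

def infer_level_py_alt (message : String) : String :=
  let msg := PySem.Str.lower message
  let matched := (pvKeywordRanks.filter (fun p => PySem.Str.isIn p.1 msg)).map Prod.snd
  match matched.min? with
  | none => "INFO"
  | some r => pvLevelNames.getD r "INFO"

-- ===== PRECONDITION & SPEC =====
def Spec_infer_level_py (message : String) (out : String) : Prop := out = infer_level_py_alt message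
instance (message : String) (out : String) : Decidable (Spec_infer_level_py message out) := by unfold Spec_infer_level_py; infer_instance

-- ===== CLAIM (what is proved, stated in full; the proofs are below) =====
def Claim_equal_infer_level_py : Prop := ∀ (message : String), Dom_infer_level_py message → Spec_infer_level_py message (infer_level_py message)

-- ===== LEMMAS AND PROOFS =====

-- min? of a cons whose head is a lower bound of the tail is the head.
theorem pvMinCons (a : Nat) (l : List Nat) (h : ∀ x ∈ l, a ≤ x) : (a :: l).min? = some a := by
  rw [List.min?_cons]
  cases hm : l.min? with
  | none => rfl
  | some m =>
    have hmem : m ∈ l := List.min?_mem hm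
    simp [Option.elim, min_eq_left (h m hmem)]

-- ranks surviving a filter of a list whose ranks are all ≥ r stay ≥ r.
theorem pvBound (f : String × Nat → Bool) (l : List (String × Nat)) (r : Nat)
    (h : ∀ p ∈ l, r ≤ p.2) : ∀ x ∈ (l.filter f).map Prod.snd, r ≤ x := by
  intro x hx
  rcases List.mem_map.mp hx with ⟨p, hp, rfl⟩
  exact h p (List.mem_filter.mp hp).1

-- characterisation of B's matched-rank minimum for an arbitrary membership predicate.
theorem pvFilterMin (f : String × Nat → Bool) :
    ((pvKeywordRanks.filter f).map Prod.snd).min? =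
      (if f ("critical", 0) || (f ("fatal", 0) || f ("emergency", 0)) then some 0
       else if f ("error", 1) || (f ("exception", 1) || f ("failed", 1)) then some 1
       else if f ("warning", 2) || f ("warn", 2) then some 2
       else if f ("info", 3) || f ("information", 3) then some 3
       else if f ("debug", 4) || f ("trace", 4) then some 4
       else none) := by
  by_cases h1 : f ("critical", 0) = true
  · simp only [pvKeywordRanks]
    rw [List.filter_cons, if_pos h1, List.map_cons]
    rw [pvMinCons 0 _ (pvBound f _ 0 (by decide))]
    simp [h1]
  by_cases h2 : f ("fatal", 0) = true
  · simp only [pvKeywordRanks]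
    rw [List.filter_cons, if_neg h1, List.filter_cons, if_pos h2, List.map_cons]
    rw [pvMinCons 0 _ (pvBound f _ 0 (by decide))]
    simp [h2]
  by_cases h3 : f ("emergency", 0) = true
  · simp only [pvKeywordRanks]
    rw [List.filter_cons, if_neg h1, List.filter_cons, if_neg h2,
        List.filter_cons, if_pos h3, List.map_cons]
    rw [pvMinCons 0 _ (pvBound f _ 0 (by decide))]
    simp [h3]
  by_cases h4 : f ("error", 1) = true
  · simp only [pvKeywordRanks]
    rw [List.filter_cons, if_neg h1, List.filter_cons, if_neg h2,
        List.filter_cons, if_neg h3, List.filter_cons, if_pos h4, List.map_cons]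
    rw [pvMinCons 1 _ (pvBound f _ 1 (by decide))]
    simp [h1, h2, h3, h4]
  by_cases h5 : f ("exception", 1) = true
  · simp only [pvKeywordRanks]
    rw [List.filter_cons, if_neg h1, List.filter_cons, if_neg h2,
        List.filter_cons, if_neg h3, List.filter_cons, if_neg h4,
        List.filter_cons, if_pos h5, List.map_cons]
    rw [pvMinCons 1 _ (pvBound f _ 1 (by decide))]
    simp [h1, h2, h3, h5]
  by_cases h6 : f ("failed", 1) = true
  · simp only [pvKeywordRanks]
    rw [List.filter_cons, if_neg h1, List.filter_cons, if_neg h2,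
        List.filter_cons, if_neg h3, List.filter_cons, if_neg h4,
        List.filter_cons, if_neg h5, List.filter_cons, if_pos h6, List.map_cons]
    rw [pvMinCons 1 _ (pvBound f _ 1 (by decide))]
    simp [h1, h2, h3, h6]
  by_cases h7 : f ("warning", 2) = true
  · simp only [pvKeywordRanks]
    rw [List.filter_cons, if_neg h1, List.filter_cons, if_neg h2,
        List.filter_cons, if_neg h3, List.filter_cons, if_neg h4,
        List.filter_cons, if_neg h5, List.filter_cons, if_neg h6,
        List.filter_cons, if_pos h7, List.map_cons]
    rw [pvMinCons 2 _ (pvBound f _ 2 (by decide))]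
    simp [h1, h2, h3, h4, h5, h6, h7]
  by_cases h8 : f ("warn", 2) = true
  · simp only [pvKeywordRanks]
    rw [List.filter_cons, if_neg h1, List.filter_cons, if_neg h2,
        List.filter_cons, if_neg h3, List.filter_cons, if_neg h4,
        List.filter_cons, if_neg h5, List.filter_cons, if_neg h6,
        List.filter_cons, if_neg h7, List.filter_cons, if_pos h8, List.map_cons]
    rw [pvMinCons 2 _ (pvBound f _ 2 (by decide))]
    simp [h1, h2, h3, h4, h5, h6, h8]
  by_cases h9 : f ("info", 3) = true
  · simp only [pvKeywordRanks]
    rw [List.filter_cons, if_neg h1, List.filter_cons, if_neg h2,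
        List.filter_cons, if_neg h3, List.filter_cons, if_neg h4,
        List.filter_cons, if_neg h5, List.filter_cons, if_neg h6,
        List.filter_cons, if_neg h7, List.filter_cons, if_neg h8,
        List.filter_cons, if_pos h9, List.map_cons]
    rw [pvMinCons 3 _ (pvBound f _ 3 (by decide))]
    simp [h1, h2, h3, h4, h5, h6, h7, h8, h9]
  by_cases h10 : f ("information", 3) = true
  · simp only [pvKeywordRanks]
    rw [List.filter_cons, if_neg h1, List.filter_cons, if_neg h2,
        List.filter_cons, if_neg h3, List.filter_cons, if_neg h4,
        List.filter_cons, if_neg h5, List.filter_cons, if_neg h6,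
        List.filter_cons, if_neg h7, List.filter_cons, if_neg h8,
        List.filter_cons, if_neg h9, List.filter_cons, if_pos h10, List.map_cons]
    rw [pvMinCons 3 _ (pvBound f _ 3 (by decide))]
    simp [h1, h2, h3, h4, h5, h6, h7, h8, h10]
  by_cases h11 : f ("debug", 4) = true
  · simp only [pvKeywordRanks]
    rw [List.filter_cons, if_neg h1, List.filter_cons, if_neg h2,
        List.filter_cons, if_neg h3, List.filter_cons, if_neg h4,
        List.filter_cons, if_neg h5, List.filter_cons, if_neg h6,
        List.filter_cons, if_neg h7, List.filter_cons, if_neg h8,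
        List.filter_cons, if_neg h9, List.filter_cons, if_neg h10,
        List.filter_cons, if_pos h11, List.map_cons]
    rw [pvMinCons 4 _ (pvBound f _ 4 (by decide))]
    simp [h1, h2, h3, h4, h5, h6, h7, h8, h9, h10, h11]
  by_cases h12 : f ("trace", 4) = true
  · simp only [pvKeywordRanks]
    rw [List.filter_cons, if_neg h1, List.filter_cons, if_neg h2,
        List.filter_cons, if_neg h3, List.filter_cons, if_neg h4,
        List.filter_cons, if_neg h5, List.filter_cons, if_neg h6,
        List.filter_cons, if_neg h7, List.filter_cons, if_neg h8,
        List.filter_cons, if_neg h9, List.filter_cons, if_neg h10,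
        List.filter_cons, if_neg h11, List.filter_cons, if_pos h12, List.map_cons]
    rw [pvMinCons 4 _ (pvBound f _ 4 (by decide))]
    simp [h1, h2, h3, h4, h5, h6, h7, h8, h9, h10, h12]
  · simp [pvKeywordRanks, h1, h2, h3, h4, h5, h6, h7, h8, h9, h10, h11, h12]

-- ===== VERDICT (by name: the statement is the Claim_ definition above) =====
theorem infer_level_py_spec : Claim_equal_infer_level_py := by
  intro message _
  unfold Spec_infer_level_py infer_level_py infer_level_py_alt
  simp only [List.any_cons, List.any_nil, Bool.or_false,
    pvFilterMin (fun p => PySem.Str.isIn p.1 (PySem.Str.lower message))]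
  split_ifs <;> simp [pvLevelNames]
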